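-- pv_equiv track=rewrite | github.com/TassWay-tech/Codeforces_Solution | Round831/a.py | solution
-- ===== SOURCE A (Python) =====
-- from math import sqrt
--
-- def is_prime(num: int):
--     if num <= 1:
--         return False
--
--     for i in range(2, int(sqrt(num)) + 1):
--         if num % i == 0:
--             return False
--
--     return True
--
-- def solution(n: int):
--     i = 2
--     while True:
--         if is_prime(i + n):
--             pass
--         else:
--             return i
--         i += 1
-- ===== SOURCE B (Python) =====
-- from math import isqrt
--
-- def is_prime(num: int):
--     return num > 1 and all(num % d for d in range(2, isqrt(num) + 1))
--
-- def solution(n: int):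
--     # answer is the smallest i >= 2 with i + n composite; a single primality
--     # test decides it: both n+2 and n+3 are prime only for n == 0 (answer 4);
--     # otherwise if n+2 is prime then n+3 is even and > 2 (answer 3), else 2.
--     if n == 0:
--         return 4
--     return 3 if is_prime(n + 2) else 2
-- ===== Notes on version B (the rewrite author's own statement) =====
-- stated objective: simpler
-- what changed: Replaced the unbounded while-loop over candidates by a closed form based on the fact that n+2 and n+3 are both prime only for n=0: B answers with at most one primality test (return 4 for n=0, else 3 if n+2 is prime, else 2).
import Mathlib
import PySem

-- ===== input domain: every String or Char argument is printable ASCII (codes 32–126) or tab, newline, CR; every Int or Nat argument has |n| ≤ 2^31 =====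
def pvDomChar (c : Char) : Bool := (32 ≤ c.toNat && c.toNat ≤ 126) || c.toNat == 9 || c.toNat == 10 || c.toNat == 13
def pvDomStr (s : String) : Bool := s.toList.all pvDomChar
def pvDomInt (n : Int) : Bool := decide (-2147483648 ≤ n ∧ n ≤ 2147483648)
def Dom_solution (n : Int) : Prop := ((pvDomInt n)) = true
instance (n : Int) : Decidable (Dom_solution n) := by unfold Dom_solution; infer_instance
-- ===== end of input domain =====

-- B replaces A's unbounded search loop by a closed form (n=0 → 4; else 3 iff n+2 prime, else 2),
-- using that n+2 and n+3 are both prime only at n = 0; objective: simpler.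


-- ===== PORT A =====
-- exact integer square root (largest k with k*k ≤ n), used to port int(sqrt(num)) / isqrt(num):
-- exact here since float sqrt is exact for 0 ≤ num ≤ 2^31+4 (the guard makes num ≥ 2 when sqrt is taken)
def isqrtFrom (n : Nat) : Nat → Nat → Nat
  | k, 0 => k
  | k, fuel + 1 => if (k + 1) * (k + 1) ≤ n then isqrtFrom n (k + 1) fuel else k

def isqrt (n : Nat) : Nat := isqrtFrom n 0 n

def is_prime (num : Int) : Bool :=
  if num ≤ 1 then false
  else if (PySem.List.pyRange 2 ((isqrt num.toNat : Int) + 1) 1).any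
            (fun i => PySem.Int.mod num i == 0) then false
  else true

-- 'while True' ported with a fuel guard; fuel 3 suffices on every input (the loop always
-- returns by i = 4, proved below), so the fuel-exhausted branch is unreachable.
def solutionLoop (n : Int) (i : Int) : Nat → Int
  | 0 => i
  | fuel + 1 => if is_prime (i + n) then solutionLoop n (i + 1) fuel else i

def solution (n : Int) : Int := solutionLoop n 2 3

-- ===== PORT B =====
def is_prime_alt (num : Int) : Bool :=
  decide (1 < num) &&
    (PySem.List.pyRange 2 ((isqrt num.toNat : Int) + 1) 1).all
      (fun d => PySem.Int.mod num d != 0)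

def solution_alt (n : Int) : Int :=
  if n == 0 then 4
  else if is_prime_alt (n + 2) then 3 else 2

-- ===== PRECONDITION & SPEC =====
def Spec_solution (n : Int) (out : Int) : Prop := out = solution_alt n
instance (n : Int) (out : Int) : Decidable (Spec_solution n out) := by unfold Spec_solution; infer_instance

-- ===== CLAIM (what is proved, stated in full; the proofs are below) =====
def Claim_equal_solution : Prop := ∀ (n : Int), Dom_solution n → Spec_solution n (solution n)

-- ===== LEMMAS AND PROOFS =====

theorem isqrtFrom_ge (n : Nat) (k fuel : Nat) : k ≤ isqrtFrom n k fuel := by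
  induction fuel generalizing k with
  | zero => simp [isqrtFrom]
  | succ f ih =>
    simp only [isqrtFrom]
    split
    · exact le_trans (Nat.le_succ k) (ih (k + 1))
    · exact le_refl k

theorem isqrt_ge_two (n : Nat) (h : 4 ≤ n) : 2 ≤ isqrt n := by
  obtain ⟨m, rfl⟩ : ∃ m, n = m + 4 := ⟨n - 4, by omega⟩
  show 2 ≤ isqrtFrom (m + 4) 0 ((m + 3) + 1)
  rw [show isqrtFrom (m + 4) 0 ((m + 3) + 1)
        = if (0 + 1) * (0 + 1) ≤ m + 4 then isqrtFrom (m + 4) 1 (m + 3) else 0 from rfl,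
      if_pos (by omega),
      show isqrtFrom (m + 4) 1 (m + 3)
        = if (1 + 1) * (1 + 1) ≤ m + 4 then isqrtFrom (m + 4) 2 (m + 2) else 1 from rfl,
      if_pos (by omega)]
  exact isqrtFrom_ge _ _ _

-- the two primality helpers compute the same Bool
theorem prime_eq (m : Int) : is_prime m = is_prime_alt m := by
  unfold is_prime is_prime_alt
  rcases le_or_gt m 1 with h | h
  · simp [h, not_lt.mpr h]
  · have h1 : ¬ m ≤ 1 := not_le.mpr h
    rw [if_neg h1]
    cases hA : (PySem.List.pyRange 2 ((isqrt m.toNat : Int) + 1) 1).any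
        (fun i => PySem.Int.mod m i == 0) <;>
      simp [List.all_eq_not_any_not, bne, hA, h]

theorem prime_ge2 (m : Int) (h : is_prime m = true) : 2 ≤ m := by
  by_contra hc
  have : m ≤ 1 := by omega
  simp [is_prime, this] at h

theorem even_not_prime (m : Int) (h4 : 4 ≤ m) (he : m % 2 = 0) : is_prime m = false := by
  unfold is_prime
  rw [if_neg (by omega : ¬ m ≤ 1)]
  have hsq : 2 ≤ isqrt m.toNat := isqrt_ge_two _ (by omega)
  have hmem : (2 : Int) ∈ PySem.List.pyRange 2 ((isqrt m.toNat : Int) + 1) 1 := by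
    rw [PySem.List.mem_pyRange_one]
    constructor
    · exact le_refl _
    · exact_mod_cast by omega
  have hany : (PySem.List.pyRange 2 ((isqrt m.toNat : Int) + 1) 1).any
      (fun i => PySem.Int.mod m i == 0) = true := by
    refine List.any_eq_true.mpr ⟨2, hmem, ?_⟩
    rw [PySem.Int.mod_eq_emod_of_pos (by norm_num)]
    simp [he]
  rw [if_pos hany]

-- ===== VERDICT (by name: the statement is the Claim_ definition above) =====
theorem solution_spec : Claim_equal_solution := by
  unfold Claim_equal_solution Spec_solution
  intro n _
  by_cases h2 : is_prime (n + 2) = true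
  · by_cases hn : n = 0
    · subst hn; decide
    · -- n+2 is prime and n ≠ 0, so n+2 is odd and n+3 is even and ≥ 4, hence composite
      have hge : 2 ≤ n + 2 := prime_ge2 _ h2
      have hodd : (n + 2) % 2 = 1 := by
        by_contra hc
        have he : (n + 2) % 2 = 0 := by omega
        rcases lt_or_ge (n + 2) 4 with hlt | hge4
        · omega
        · rw [even_not_prime (n + 2) hge4 he] at h2; cases h2
      have h3 : is_prime (n + 3) = false :=
        even_not_prime (n + 3) (by omega) (by omega)
      simp [solution, solutionLoop, solution_alt, hn, ← prime_eq,
            show (2 : Int) + n = n + 2 from by ring,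
            show (3 : Int) + n = n + 3 from by ring, h2, h3]
  · -- n+2 is composite (or ≤ 1): both sides return 2
    have hn : n ≠ 0 := by rintro rfl; exact h2 (by decide)
    simp [solution, solutionLoop, solution_alt, hn, ← prime_eq,
          show (2 : Int) + n = n + 2 from by ring, h2]
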